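-- pv_equiv track=rewrite | github.com/rishabh-sachdeva/AI-Algorithms | AStarNavigatingInTerrain.py | structurePath
-- ===== SOURCE A (Python) =====
-- def structurePath(cameFrom,startNode,goalNode,matrix,costDict):
--     node=goalNode
--     path=""
--     while(node != startNode):
--         pNode=cameFrom[node]
--         if pNode[1]-node[1]==-1:
--             path=path +'E'
--         elif pNode[1]-node[1]==1:
--             path=path +'W'
--         elif pNode[0]-node[0]==-1:
--             path = path + 'S'
--         else:
--             path=path +'N'
--         node=pNode
--     return path[::-1] # reverse generated path.
-- ===== SOURCE B (Python) =====
-- def structurePath(cameFrom, startNode, goalNode, matrix, costDict):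
--     EW = {-1: 'E', 1: 'W'}
--     def walk(node):
--         if node == startNode:
--             return ''
--         p = cameFrom[node]
--         return walk(p) + EW.get(p[1] - node[1], 'S' if p[0] - node[0] == -1 else 'N')
--     return walk(goalNode)
-- ===== Notes on version B (the rewrite author's own statement) =====
-- stated objective: alternative
-- what changed: B replaces A's iterative string-growing loop plus final string reversal by a direct recursion over the cameFrom chain that emits letters in start-to-goal order (no reversal), and replaces the E/W if-chain by a small delta-keyed dict lookup with a computed default.
import Mathlib
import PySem

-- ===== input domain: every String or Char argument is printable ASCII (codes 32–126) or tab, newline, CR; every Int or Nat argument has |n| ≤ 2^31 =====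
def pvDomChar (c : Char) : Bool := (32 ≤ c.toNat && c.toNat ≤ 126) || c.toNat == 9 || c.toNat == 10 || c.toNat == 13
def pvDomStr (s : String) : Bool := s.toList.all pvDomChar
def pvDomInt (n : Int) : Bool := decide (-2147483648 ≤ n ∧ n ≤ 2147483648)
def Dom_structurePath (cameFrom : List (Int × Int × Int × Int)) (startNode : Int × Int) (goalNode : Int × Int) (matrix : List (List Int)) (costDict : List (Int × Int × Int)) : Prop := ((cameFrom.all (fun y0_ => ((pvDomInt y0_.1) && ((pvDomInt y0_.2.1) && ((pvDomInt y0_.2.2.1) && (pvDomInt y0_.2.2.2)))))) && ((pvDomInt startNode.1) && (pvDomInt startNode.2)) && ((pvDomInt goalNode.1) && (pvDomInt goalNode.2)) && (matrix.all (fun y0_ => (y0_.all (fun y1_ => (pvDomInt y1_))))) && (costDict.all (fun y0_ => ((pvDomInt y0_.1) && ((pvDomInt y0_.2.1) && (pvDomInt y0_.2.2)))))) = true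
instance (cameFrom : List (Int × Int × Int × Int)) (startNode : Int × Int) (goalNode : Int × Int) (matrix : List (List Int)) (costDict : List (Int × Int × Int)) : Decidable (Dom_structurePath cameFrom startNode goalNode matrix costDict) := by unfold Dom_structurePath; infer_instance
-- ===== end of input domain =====

-- B re-implements the path reconstruction as a direct recursion over the cameFrom chain that emits
-- letters in start-to-goal order (no reversal), with a delta-keyed dict for the E/W letters,
-- instead of A's iterative string-growing loop with a final string reversal.

-- ===== PORT A =====
-- A's dict lookup cameFrom[node] (first match in the association list; none = KeyError)
def pvLookup (cameFrom : List (Int × Int × Int × Int)) (n : Int × Int) : Option (Int × Int) :=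
  match cameFrom.find? (fun e => e.1 == n.1 && e.2.1 == n.2) with
  | some e => some (e.2.2.1, e.2.2.2)
  | none => none

-- A's if/elif chain choosing the direction letter
def pvDir (pNode node : Int × Int) : Char :=
  if pNode.2 - node.2 = -1 then 'E'
  else if pNode.2 - node.2 = 1 then 'W'
  else if pNode.1 - node.1 = -1 then 'S'
  else 'N'

-- A's while loop, fueled (Pre_ guarantees cameFrom.length + 1 steps suffice; outside Pre_ Python
-- raises KeyError or diverges and nothing is claimed)
def aLoop (cameFrom : List (Int × Int × Int × Int)) (startNode : Int × Int) :
    Nat → (Int × Int) → List Char → List Char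
  | 0, _, path => path
  | fuel+1, node, path =>
    if node = startNode then path
    else
      match pvLookup cameFrom node with
      | none => path
      | some pNode => aLoop cameFrom startNode fuel pNode (path ++ [pvDir pNode node])

def structurePath (cameFrom : List (Int × Int × Int × Int)) (startNode : Int × Int) (goalNode : Int × Int) (matrix : List (List Int)) (costDict : List (Int × Int × Int)) : String :=
  String.ofList ((aLoop cameFrom startNode (cameFrom.length + 1) goalNode []).reverse)

-- ===== PORT B =====
-- Source B's EW = {-1: 'E', 1: 'W'}
def bEW : PySem.Dict Int Char := PySem.Dict.ofList [(-1, 'E'), (1, 'W')]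

-- Source B's cameFrom[node]: first matching entry of the association list
def bFind (cameFrom : List (Int × Int × Int × Int)) (n : Int × Int) : Option (Int × Int) :=
  (cameFrom.filterMap
    (fun e => if (e.1, e.2.1) = n then some (e.2.2.1, e.2.2.2) else none)).head?

-- Source B's recursive walk: letters from startNode up to node, in start→goal order
-- (fueled like A's loop; Pre_ guarantees the fuel suffices)
def bWalk (cameFrom : List (Int × Int × Int × Int)) (startNode : Int × Int) :
    Nat → (Int × Int) → List Char
  | 0, _ => []
  | fuel+1, node =>
    if node = startNode then []
    else
      match bFind cameFrom node with
      | none => []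
      | some p =>
        bWalk cameFrom startNode fuel p
          ++ [bEW.getD (p.2 - node.2) (if p.1 - node.1 = -1 then 'S' else 'N')]

def structurePath_alt (cameFrom : List (Int × Int × Int × Int)) (startNode : Int × Int) (goalNode : Int × Int) (matrix : List (List Int)) (costDict : List (Int × Int × Int)) : String :=
  String.ofList (bWalk cameFrom startNode (cameFrom.length + 1) goalNode)

-- ===== PRECONDITION & SPEC =====
def pvChainStep (cameFrom : List (Int × Int × Int × Int)) (o : Option (Int × Int)) : Option (Int × Int) :=
  o.bind (pvLookup cameFrom)

-- Pre_: the parent chain from goalNode reaches startNode (within |cameFrom| steps, which is always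
-- enough when it reaches it at all); elsewhere Python A raises KeyError or loops forever.
def Pre_structurePath (cameFrom : List (Int × Int × Int × Int)) (startNode : Int × Int) (goalNode : Int × Int) (matrix : List (List Int)) (costDict : List (Int × Int × Int)) : Prop :=
  ∃ k ≤ cameFrom.length, (pvChainStep cameFrom)^[k] (some goalNode) = some startNode
instance (cameFrom : List (Int × Int × Int × Int)) (startNode : Int × Int) (goalNode : Int × Int) (matrix : List (List Int)) (costDict : List (Int × Int × Int)) : Decidable (Pre_structurePath cameFrom startNode goalNode matrix costDict) := by unfold Pre_structurePath; infer_instance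

def pvWitness_structurePath : (List (Int × Int × Int × Int)) × (Int × Int) × (Int × Int) × List (List Int) × (List (Int × Int × Int)) :=
  ([(1, 1, 0, 0)], (0, 0), (1, 1), [[0]], [])

def Spec_structurePath (cameFrom : List (Int × Int × Int × Int)) (startNode : Int × Int) (goalNode : Int × Int) (matrix : List (List Int)) (costDict : List (Int × Int × Int)) (out : String) : Prop := out = structurePath_alt cameFrom startNode goalNode matrix costDict
instance (cameFrom : List (Int × Int × Int × Int)) (startNode : Int × Int) (goalNode : Int × Int) (matrix : List (List Int)) (costDict : List (Int × Int × Int)) (out : String) : Decidable (Spec_structurePath cameFrom startNode goalNode matrix costDict out) := by unfold Spec_structurePath; infer_instance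

-- ===== CLAIM =====
def Claim_equal_structurePath : Prop := ∀ (cameFrom : List (Int × Int × Int × Int)) (startNode : Int × Int) (goalNode : Int × Int) (matrix : List (List Int)) (costDict : List (Int × Int × Int)), Dom_structurePath cameFrom startNode goalNode matrix costDict → Pre_structurePath cameFrom startNode goalNode matrix costDict → Spec_structurePath cameFrom startNode goalNode matrix costDict (structurePath cameFrom startNode goalNode matrix costDict)

-- ===== LEMMAS AND PROOFS =====
-- the two lookups agree
theorem find_eq_lookup (n : Int × Int) :
    ∀ (cameFrom : List (Int × Int × Int × Int)), bFind cameFrom n = pvLookup cameFrom n := by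
  intro cameFrom
  induction cameFrom with
  | nil => rfl
  | cons e rest ih =>
    by_cases h : (e.1, e.2.1) = n
    · have h1 : e.1 = n.1 := congrArg Prod.fst h
      have h2 : e.2.1 = n.2 := congrArg Prod.snd h
      have hb : (e.1 == n.1 && e.2.1 == n.2) = true := by simp [h1, h2]
      simp [bFind, pvLookup, List.filterMap_cons, List.find?_cons, hb, h]
    · have hb : (e.1 == n.1 && e.2.1 == n.2) = false := by
        rcases Decidable.not_and_iff_not_or_not.mp
          (fun hc : e.1 = n.1 ∧ e.2.1 = n.2 => h (Prod.ext hc.1 hc.2)) with hh | hh <;> simp [hh]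
      simp only [bFind, pvLookup, List.filterMap_cons, List.find?_cons, hb, if_neg h]
      simpa [bFind, pvLookup] using ih

-- bEW evaluated as a literal dict
theorem bEW_items : bEW = PySem.Dict.mk [((-1 : Int), 'E'), (1, 'W')] := by decide

-- the dict lookup computes A's direction letter
theorem dictDir_eq (p node : Int × Int) :
    bEW.getD (p.2 - node.2) (if p.1 - node.1 = -1 then 'S' else 'N') = pvDir p node := by
  rw [bEW_items]
  unfold pvDir
  by_cases h1 : p.2 - node.2 = -1
  · simp [h1, PySem.Dict.getD, PySem.Dict.get?, List.find?]
  · by_cases h2 : p.2 - node.2 = 1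
    · simp [h2, PySem.Dict.getD, PySem.Dict.get?, List.find?]
    · have b1 : ((-1 : Int) == p.2 - node.2) = false := by simp [Ne.symm h1]
      have b2 : ((1 : Int) == p.2 - node.2) = false := by simp [Ne.symm h2]
      simp [h1, h2, PySem.Dict.getD, PySem.Dict.get?, List.find?, b1, b2]

-- A's loop with accumulator = accumulator ++ A's loop started empty
theorem aLoop_acc (cameFrom : List (Int × Int × Int × Int)) (startNode : Int × Int) :
    ∀ (fuel : Nat) (node : Int × Int) (acc : List Char),
      aLoop cameFrom startNode fuel node acc = acc ++ aLoop cameFrom startNode fuel node [] := by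
  intro fuel
  induction fuel with
  | zero => intro node acc; simp [aLoop]
  | succ f ih =>
    intro node acc
    simp only [aLoop]
    split
    · simp
    · cases h : pvLookup cameFrom node with
      | none => simp
      | some p =>
        simp only []
        rw [ih p (acc ++ [pvDir p node]), ih p ([] ++ [pvDir p node])]
        simp

-- main invariant: B's recursion is the reverse of what A's loop emits
theorem main_inv (cameFrom : List (Int × Int × Int × Int)) (startNode : Int × Int) :
    ∀ (fuel : Nat) (node : Int × Int),
      bWalk cameFrom startNode fuel node = (aLoop cameFrom startNode fuel node []).reverse := by
  intro fuel
  induction fuel with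
  | zero => intro node; simp [bWalk, aLoop]
  | succ f ih =>
    intro node
    simp only [bWalk, aLoop, find_eq_lookup]
    split
    · simp
    · cases h : pvLookup cameFrom node with
      | none => simp
      | some p =>
        simp only []
        rw [ih p, dictDir_eq, aLoop_acc cameFrom startNode f p ([] ++ [pvDir p node])]
        simp

-- ===== VERDICT =====
theorem structurePath_spec : Claim_equal_structurePath := by
  intro cameFrom startNode goalNode matrix costDict _ _
  unfold Spec_structurePath structurePath structurePath_alt
  rw [main_inv]
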